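-- pv_equiv track=rewrite | github.com/fannix/DL | parity_code.py | compute_parity_seq
-- ===== SOURCE A (Python) =====
-- def compute_parity_seq(seq):
--     parity_li = []
--     num_even = 0
--     for _, e in enumerate(seq):
--         if e % 2 == 0:
--             num_even += 1
--
--         if num_even % 2 == 1:
--             parity_li.append(1)
--         else:
--             parity_li.append(0)
--
--     return parity_li
-- ===== SOURCE B (Python) =====
-- def compute_parity_seq(seq):
--     # count the evens once, then build the answer right-to-left from the total,
--     # decrementing the count each time an even element is passed
--     total = sum(1 for e in seq if e % 2 == 0)
--     out = []
--     c = total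
--     for e in reversed(seq):
--         out.append(c % 2)
--         if e % 2 == 0:
--             c -= 1
--     out.reverse()
--     return out
-- ===== Notes on version B (the rewrite author's own statement) =====
-- stated objective: alternative
-- what changed: Replaces A's single left-to-right pass with a growing even-counter by a two-pass scheme: first count all evens, then walk the sequence right-to-left emitting the running count's parity and decrementing it at each even element, reversing the result at the end.
import Mathlib
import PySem

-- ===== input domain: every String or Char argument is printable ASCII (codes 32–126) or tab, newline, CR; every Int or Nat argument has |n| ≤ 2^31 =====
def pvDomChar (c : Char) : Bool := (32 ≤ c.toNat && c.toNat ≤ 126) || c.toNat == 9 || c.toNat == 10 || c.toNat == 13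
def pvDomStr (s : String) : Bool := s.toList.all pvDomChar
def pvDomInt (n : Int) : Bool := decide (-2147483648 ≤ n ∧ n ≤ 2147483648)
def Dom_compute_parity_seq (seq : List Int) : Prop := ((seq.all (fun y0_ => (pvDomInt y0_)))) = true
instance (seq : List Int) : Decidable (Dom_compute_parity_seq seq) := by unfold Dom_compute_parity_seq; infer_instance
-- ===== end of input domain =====

-- B counts the evens once, then builds the answer right-to-left from the total count (alternative decomposition, same cost).


-- ===== PORT A =====
def compute_parity_seq (seq : List Int) : List Int :=
  (seq.foldl
    (fun (st : List Int × Int) e =>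
      let num_even := if PySem.Int.mod e 2 = 0 then st.2 + 1 else st.2
      (st.1 ++ [if PySem.Int.mod num_even 2 = 1 then (1 : Int) else 0], num_even))
    ([], 0)).1

-- ===== PORT B =====
-- total = sum(1 for e in seq if e % 2 == 0)
def pvCountEvens (seq : List Int) : Int :=
  seq.foldl (fun acc e => if PySem.Int.mod e 2 = 0 then acc + 1 else acc) 0

-- the reversed-order walk: append c % 2, decrement c at each even element
def pvRevWalk (c : Int) : List Int → List Int
  | [] => []
  | e :: rest => PySem.Int.mod c 2 :: pvRevWalk (if PySem.Int.mod e 2 = 0 then c - 1 else c) rest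

def compute_parity_seq_alt (seq : List Int) : List Int :=
  (pvRevWalk (pvCountEvens seq) seq.reverse).reverse

-- ===== PRECONDITION & SPEC =====
def Spec_compute_parity_seq (seq : List Int) (out : List Int) : Prop := out = compute_parity_seq_alt seq
instance (seq : List Int) (out : List Int) : Decidable (Spec_compute_parity_seq seq out) := by unfold Spec_compute_parity_seq; infer_instance

-- ===== CLAIM (what is proved, stated in full; the proofs are below) =====
def Claim_equal_compute_parity_seq : Prop := ∀ (seq : List Int), Dom_compute_parity_seq seq → Spec_compute_parity_seq seq (compute_parity_seq seq)

-- ===== LEMMAS AND PROOFS =====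

theorem pv_mod_two (a : Int) : PySem.Int.mod a 2 = a % 2 :=
  PySem.Int.mod_eq_emod_of_pos (by omega)

theorem pv_main (seq : List Int) :
    (seq.foldl
      (fun (st : List Int × Int) e =>
        let num_even := if PySem.Int.mod e 2 = 0 then st.2 + 1 else st.2
        (st.1 ++ [if PySem.Int.mod num_even 2 = 1 then (1 : Int) else 0], num_even))
      ([], 0))
    = ((pvRevWalk (pvCountEvens seq) seq.reverse).reverse, pvCountEvens seq) := by
  induction seq using List.reverseRecOn with
  | nil => simp [pvCountEvens, pvRevWalk]
  | append_singleton xs x ih =>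
    rw [List.foldl_append, ih]
    have hcE : pvCountEvens (xs ++ [x])
        = if PySem.Int.mod x 2 = 0 then pvCountEvens xs + 1 else pvCountEvens xs := by
      simp [pvCountEvens, List.foldl_append]
    have hbit : ∀ c : Int,
        (if PySem.Int.mod c 2 = 1 then (1 : Int) else 0) = PySem.Int.mod c 2 := by
      intro c
      have h0 : 0 ≤ c % 2 := Int.emod_nonneg c (by omega)
      have h2 : c % 2 < 2 := Int.emod_lt_of_pos c (by omega)
      rw [pv_mod_two]; split_ifs with hh <;> omega
    simp only [List.foldl_cons, List.foldl_nil, List.reverse_append, List.reverse_singleton,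
      List.singleton_append]
    by_cases h : PySem.Int.mod x 2 = 0
    · rw [hcE, if_pos h]
      simp only [pvRevWalk, h, if_pos, hbit]
      simp
    · rw [hcE, if_neg h]
      simp only [pvRevWalk, h, if_neg, if_false, hbit]
      simp

-- ===== VERDICT (by name: the statement is the Claim_ definition above) =====
theorem compute_parity_seq_spec : Claim_equal_compute_parity_seq := by
  intro seq _
  unfold Spec_compute_parity_seq compute_parity_seq compute_parity_seq_alt
  rw [pv_main]
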